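-- pv_equiv track=rewrite | github.com/NoBlackBoxes/LastBlackBox | course/materials/insert_goals.py | find_goals_section
-- ===== SOURCE A (Python) =====
-- def find_goals_section(readme):
--     # Find start and end of goals section
--     start = stop = lc = 0
--     found = False
--     for line in readme:
--         if (line[:4] == '----'):
--             if (found):
--                 stop = lc
--                 break
--         elif((not found) and (line[:8] == '## Goals')):
--             start = lc - 1
--             found = True
--         lc = lc + 1
--     return start, stop
-- ===== SOURCE B (Python) =====
-- def find_goals_section(readme):
--     # Single BACKWARD pass: walk the file bottom-up, remembering the nearest
--     # '----' line below the current position; at each '## Goals' header record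
--     # (header-1, nearest dash below).  The first header of the file is visited
--     # last, so its record is the one returned.
--     start, stop = 0, 0
--     next_dash = None
--     for i in range(len(readme) - 1, -1, -1):
--         line = readme[i]
--         if line[:4] == '----':
--             next_dash = i
--         elif line[:8] == '## Goals':
--             start, stop = i - 1, (next_dash if next_dash is not None else 0)
--     return start, stop
-- ===== Notes on version B (the rewrite author's own statement) =====
-- stated objective: alternative
-- what changed: Replaces A's forward single-pass found/lc/break state machine with a single backward (bottom-up) pass that tracks the nearest '----' line below and records (header-1, that dash) at each header, so the first header's record, visited last, wins.
import Mathlib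
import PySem

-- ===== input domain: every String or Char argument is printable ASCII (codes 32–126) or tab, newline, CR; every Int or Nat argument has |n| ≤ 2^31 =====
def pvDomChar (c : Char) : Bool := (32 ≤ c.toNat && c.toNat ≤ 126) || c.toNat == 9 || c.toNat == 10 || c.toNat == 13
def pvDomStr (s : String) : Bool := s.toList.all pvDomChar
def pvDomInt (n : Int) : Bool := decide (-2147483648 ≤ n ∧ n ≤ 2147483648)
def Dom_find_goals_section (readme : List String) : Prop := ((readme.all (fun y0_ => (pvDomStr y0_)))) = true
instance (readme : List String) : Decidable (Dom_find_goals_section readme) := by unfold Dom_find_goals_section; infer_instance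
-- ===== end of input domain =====

-- B replaces A's forward found/lc/break state machine by a single backward pass
-- tracking the nearest '----' below; same return value, alternative traversal.

-- ===== PORT A =====
-- loop state: (start, stop, lc, found); the `break` becomes returning immediately
def findGoalsLoop : List String → Int → Int → Int → Bool → Int × Int
  | [], start, stop, _, _ => (start, stop)
  | line :: rest, start, stop, lc, found =>
    if PySem.Str.slice line none (some 4) == "----" then
      if found then (start, lc)
      else findGoalsLoop rest start stop (lc + 1) found
    else if (!found) && (PySem.Str.slice line none (some 8) == "## Goals") then
      findGoalsLoop rest (lc - 1) stop (lc + 1) true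
    else findGoalsLoop rest start stop (lc + 1) found

def find_goals_section (readme : List String) : Int × Int :=
  findGoalsLoop readme 0 0 0 false

-- ===== PORT B =====
-- backward loop of Source B: the recursion processes the tail (larger indices) first,
-- exactly as `for i in range(len(readme)-1, -1, -1)` does; state = ((start, stop), next_dash)
def bLoop : List (Int × String) → (Int × Int) × Option Int
  | [] => ((0, 0), none)
  | (i, line) :: rest =>
    let st := bLoop rest
    if PySem.Str.slice line none (some 4) == "----" then (st.1, some i)
    else if PySem.Str.slice line none (some 8) == "## Goals" then
      ((i - 1, st.2.getD 0), st.2)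
    else st

def find_goals_section_alt (readme : List String) : Int × Int :=
  (bLoop (PySem.List.enumerate readme 0)).1

-- ===== PRECONDITION & SPEC =====
def Spec_find_goals_section (readme : List String) (out : Int × Int) : Prop := out = find_goals_section_alt readme
instance (readme : List String) (out : Int × Int) : Decidable (Spec_find_goals_section readme out) := by unfold Spec_find_goals_section; infer_instance

-- ===== CLAIM (what is proved, stated in full; the proofs are below) =====
def Claim_equal_find_goals_section : Prop := ∀ (readme : List String), Dom_find_goals_section readme → Spec_find_goals_section readme (find_goals_section readme)

-- ===== LEMMAS AND PROOFS =====

-- a line starting with "## Goals" cannot also start with "----"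
theorem hdr_not_dash (s : String)
    (h : (PySem.Str.slice s none (some 8) == "## Goals") = true) :
    (PySem.Str.slice s none (some 4) == "----") = false := by
  rw [beq_iff_eq] at h
  have key8 : (PySem.Str.slice s none (some 8)).toList = s.toList.take 8 := by
    simp [pysem]
  have key4 : (PySem.Str.slice s none (some 4)).toList = s.toList.take 4 := by
    simp [pysem]
  have h8 : s.toList.take 8 = "## Goals".toList := by
    rw [← key8, h]
  have h4 : s.toList.take 4 = "## G".toList := by
    have ht : s.toList.take 4 = (s.toList.take 8).take 4 := by
      rw [List.take_take]; norm_num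
    rw [ht, h8]; decide
  rw [beq_eq_false_iff_ne]
  intro hc
  have h' := congrArg String.toList hc
  rw [key4, h4] at h'
  exact absurd h' (by decide)

-- common closed form both loops are reduced to
def goalsSpec (l : List String) (s : Int) : Int × Int :=
  match l.findIdx? (fun line => PySem.Str.slice line none (some 8) == "## Goals") with
  | none => (0, 0)
  | some i =>
    (s + (i : Int) - 1,
      match (l.drop (i + 1)).findIdx?
          (fun line => PySem.Str.slice line none (some 4) == "----") with
      | none => 0
      | some j => s + (i : Int) + 1 + (j : Int))

-- A, phase 2 (found = true, stop still 0): result is (start, lc + first dash index), or (start, 0)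
theorem phase2 (l : List String) (s lc : Int) :
    findGoalsLoop l s 0 lc true =
      (s, match l.findIdx? (fun line => PySem.Str.slice line none (some 4) == "----") with
          | none => 0
          | some j => lc + (j : Int)) := by
  induction l generalizing lc with
  | nil => simp [findGoalsLoop]
  | cons a t ih =>
    simp only [findGoalsLoop, List.findIdx?_cons]
    by_cases h : (PySem.Str.slice a none (some 4) == "----") = true
    · simp [h]
    · simp only [h, Bool.not_true, Bool.false_and]
      rw [ih]
      cases ht : t.findIdx? (fun line => PySem.Str.slice line none (some 4) == "----") with
      | none => simp
      | some j => simp; ring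

-- A, phase 1 (found = false, start = stop = 0)
theorem phase1 (l : List String) (lc : Int) :
    findGoalsLoop l 0 0 lc false = goalsSpec l lc := by
  induction l generalizing lc with
  | nil => simp [findGoalsLoop, goalsSpec]
  | cons a t ih =>
    simp only [findGoalsLoop, goalsSpec, List.findIdx?_cons]
    by_cases hh : (PySem.Str.slice a none (some 8) == "## Goals") = true
    · have hd := hdr_not_dash a hh
      simp only [hd, Bool.false_eq_true, if_false, Bool.not_false, Bool.true_and, hh, if_true]
      rw [phase2]
      cases h2 : t.findIdx? (fun line => PySem.Str.slice line none (some 4) == "----") with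
      | none => simp [h2]
      | some j => simp [h2]
    · simp only [hh, Bool.false_eq_true, if_false]
      by_cases hd : (PySem.Str.slice a none (some 4) == "----") = true
      · simp only [hd, if_true, Bool.not_false, Bool.true_and]
        rw [ih, goalsSpec]
        cases h1 : t.findIdx? (fun line => PySem.Str.slice line none (some 8) == "## Goals") with
        | none => simp
        | some i =>
          simp only [Option.map_some, List.drop_succ_cons]
          cases h2 : (t.drop (i + 1)).findIdx? (fun line => PySem.Str.slice line none (some 4) == "----") with
          | none => simp [h2]; try omega
          | some j => simp [h2]; try omega
      · simp only [hd, Bool.false_eq_true, if_false, Bool.not_false, Bool.true_and]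
        rw [ih, goalsSpec]
        cases h1 : t.findIdx? (fun line => PySem.Str.slice line none (some 8) == "## Goals") with
        | none => simp
        | some i =>
          simp only [Option.map_some, List.drop_succ_cons]
          cases h2 : (t.drop (i + 1)).findIdx? (fun line => PySem.Str.slice line none (some 4) == "----") with
          | none => simp [h2]; try omega
          | some j => simp [h2]; try omega

-- B's backward fold, fully characterised: answer part is goalsSpec, next_dash is the
-- (shifted) index of the first dash line
theorem bLoop_char (l : List String) (s : Int) :
    bLoop (PySem.List.enumerate l s) =
      (goalsSpec l s,
       (l.findIdx? (fun line => PySem.Str.slice line none (some 4) == "----")).map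
         (fun j => s + (j : Int))) := by
  induction l generalizing s with
  | nil => simp [bLoop, goalsSpec, PySem.List.enumerate_nil]
  | cons a t ih =>
    rw [PySem.List.enumerate_cons]
    simp only [bLoop, ih, goalsSpec, List.findIdx?_cons]
    by_cases hd : (PySem.Str.slice a none (some 4) == "----") = true
    · -- dash line: next_dash := s, answer unchanged; a is not a header
      have hh : (PySem.Str.slice a none (some 8) == "## Goals") = false := by
        by_cases h : (PySem.Str.slice a none (some 8) == "## Goals") = true
        · exact absurd hd (by simp [hdr_not_dash a h])
        · simpa using h
      simp only [hd, if_true, hh, Bool.false_eq_true, if_false]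
      cases h1 : t.findIdx? (fun line => PySem.Str.slice line none (some 8) == "## Goals") with
      | none => simp
      | some i =>
        simp only [Option.map_some, List.drop_succ_cons]
        cases h2 : (t.drop (i + 1)).findIdx? (fun line => PySem.Str.slice line none (some 4) == "----") with
        | none => simp [h2]; try omega
        | some j => simp [h2]; try omega
    · simp only [hd, Bool.false_eq_true, if_false]
      by_cases hh : (PySem.Str.slice a none (some 8) == "## Goals") = true
      · -- header line: record (s - 1, next_dash.getD 0)
        simp only [hh, if_true, Option.map_some]
        cases h2 : t.findIdx? (fun line => PySem.Str.slice line none (some 4) == "----") with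
        | none => simp [h2]
        | some j => simp [h2]; omega
      · simp only [hh, Bool.false_eq_true, if_false]
        cases h1 : t.findIdx? (fun line => PySem.Str.slice line none (some 8) == "## Goals") with
        | none =>
          simp
          cases h2 : t.findIdx? (fun line => PySem.Str.slice line none (some 4) == "----") with
          | none => simp
          | some j => simp; omega
        | some i =>
          simp only [Option.map_some, List.drop_succ_cons, Prod.mk.injEq]
          refine ⟨?_, ?_⟩
          · cases h2 : (t.drop (i + 1)).findIdx? (fun line => PySem.Str.slice line none (some 4) == "----") with
            | none => simp [h2]; try omega
            | some j => simp [h2]; try omega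
          · cases h2 : t.findIdx? (fun line => PySem.Str.slice line none (some 4) == "----") with
            | none => simp
            | some j => simp; omega

-- ===== VERDICT (by name: the statement is the Claim_ definition above) =====
theorem find_goals_section_spec : Claim_equal_find_goals_section := by
  intro readme _
  unfold Spec_find_goals_section find_goals_section find_goals_section_alt
  rw [phase1, bLoop_char]
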